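-- pv_equiv track=rewrite | github.com/mkaanerkoc/advent_of_code_2021 | n_queen_problem.py | calculate_legal_squares
-- ===== SOURCE A (Python) =====
-- def calculate_legal_squares(size:int, queens:list, row:int) -> set:
--     '''
--     helper method. it calculates the legal squares for the
--     given row by using board size and already placed queens
--     on the board.
--     '''
--     # initially set all squares as legal.
--     line = set(range(size))
--     for queen in queens:
--         queen_row, queen_col = queen
--         depth = row - queen_row
--         # remove the illegal squares from set. out of board squares will be discarded.
--         line.discard(queen_col)
--         line.discard(queen_col-depth)
--         line.discard(queen_col+depth)
--     return line
-- ===== SOURCE B (Python) =====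
-- def calculate_legal_squares(size: int, queens: list, row: int) -> set:
--     '''Per-column scan: keep column c iff no placed queen attacks (row, c).'''
--     return {c for c in range(size)
--             if all(c != qc
--                    and c != qc - (row - qr)
--                    and c != qc + (row - qr)
--                    for qr, qc in queens)}
-- ===== Notes on version B (the rewrite author's own statement) =====
-- stated objective: alternative
-- what changed: Flips the loop nesting: instead of building set(range(size)) and discarding each queen's column and two diagonal squares, B scans each candidate column once and keeps it iff it survives an inner check against every placed queen.
import Mathlib
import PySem

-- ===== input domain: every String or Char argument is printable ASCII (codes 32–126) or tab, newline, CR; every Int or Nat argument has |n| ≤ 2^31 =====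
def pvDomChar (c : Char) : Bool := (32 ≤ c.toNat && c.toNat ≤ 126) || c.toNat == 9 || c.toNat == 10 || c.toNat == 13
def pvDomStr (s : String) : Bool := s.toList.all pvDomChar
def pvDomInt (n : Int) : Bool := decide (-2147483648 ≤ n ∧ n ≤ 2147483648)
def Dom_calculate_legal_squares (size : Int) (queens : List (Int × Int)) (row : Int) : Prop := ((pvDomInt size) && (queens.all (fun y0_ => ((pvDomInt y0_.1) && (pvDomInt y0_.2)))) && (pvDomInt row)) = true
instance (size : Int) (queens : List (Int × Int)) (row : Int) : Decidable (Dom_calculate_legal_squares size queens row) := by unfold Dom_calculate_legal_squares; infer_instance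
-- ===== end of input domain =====

-- B flips the loop nesting: a per-column scan with an inner check against every queen,
-- instead of A's per-queen discards from set(range(size)); same result, alternative decomposition.

-- ===== PORT A =====
def calculate_legal_squares (size : Int) (queens : List (Int × Int)) (row : Int) : List Int :=
  -- line = set(range(size))
  let line := PySem.Set.ofList (PySem.List.pyRange 0 size 1)
  -- for queen in queens: discard queen_col, queen_col-depth, queen_col+depth
  queens.foldl (fun line queen =>
    let queen_row := queen.1
    let queen_col := queen.2
    let depth := row - queen_row
    let line := PySem.Set.discard line queen_col
    let line := PySem.Set.discard line (queen_col - depth)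
    let line := PySem.Set.discard line (queen_col + depth)
    line) line

-- ===== PORT B =====
def calculate_legal_squares_alt (size : Int) (queens : List (Int × Int)) (row : Int) : List Int :=
  -- {c for c in range(size) if all(c != qc and c != qc-(row-qr) and c != qc+(row-qr) for qr, qc in queens)}
  (PySem.List.pyRange 0 size 1).filter (fun c =>
    queens.all (fun q =>
      decide (c ≠ q.2) && decide (c ≠ q.2 - (row - q.1)) && decide (c ≠ q.2 + (row - q.1))))

-- ===== PRECONDITION & SPEC =====
def Spec_calculate_legal_squares (size : Int) (queens : List (Int × Int)) (row : Int) (out : List Int) : Prop := out = calculate_legal_squares_alt size queens row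
instance (size : Int) (queens : List (Int × Int)) (row : Int) (out : List Int) : Decidable (Spec_calculate_legal_squares size queens row out) := by unfold Spec_calculate_legal_squares; infer_instance

-- ===== CLAIM (what is proved, stated in full; the proofs are below) =====
def Claim_equal_calculate_legal_squares : Prop := ∀ (size : Int) (queens : List (Int × Int)) (row : Int), Dom_calculate_legal_squares size queens row → Spec_calculate_legal_squares size queens row (calculate_legal_squares size queens row)

-- ===== LEMMAS AND PROOFS =====

-- A's loop body, as a function of the running set and one queen
def pvStep (row : Int) (s : PySem.Set Int) (q : Int × Int) : PySem.Set Int :=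
  PySem.Set.discard (PySem.Set.discard (PySem.Set.discard s q.2) (q.2 - (row - q.1))) (q.2 + (row - q.1))

-- B's per-queen survival test for a column c
def pvOk (row : Int) (c : Int) (q : Int × Int) : Bool :=
  decide (c ≠ q.2) && decide (c ≠ q.2 - (row - q.1)) && decide (c ≠ q.2 + (row - q.1))

-- folding A's discards over the queens filters the start list by B's test
theorem pvFoldlDiscard (row : Int) (queens : List (Int × Int)) (l : List Int) :
    queens.foldl (pvStep row) l = l.filter (fun c => queens.all (pvOk row c)) := by
  induction queens generalizing l with
  | nil => simp
  | cons q qs ih =>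
    simp only [List.foldl_cons, ih, pvStep, PySem.Set.discard, List.filter_filter, List.all_cons]
    apply List.filter_congr
    intro a _
    simp [pvOk, Bool.beq_eq_decide_eq, Bool.and_comm, Bool.and_left_comm]

-- ===== VERDICT (by name: the statement is the Claim_ definition above) =====
theorem calculate_legal_squares_spec : Claim_equal_calculate_legal_squares := by
  intro size queens row _
  show queens.foldl (pvStep row) (PySem.Set.ofList (PySem.List.pyRange 0 size 1)) =
    (PySem.List.pyRange 0 size 1).filter (fun c => queens.all (pvOk row c))
  rw [PySem.Set.ofList_eq_self_of_nodup _ (PySem.List.nodup_pyRange_one 0 size), pvFoldlDiscard]
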